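-- pv_equiv track=rewrite | github.com/aborczuk/app-foundation | scripts/edit_code.py | _split_dirty_candidates
-- ===== SOURCE A (Python) =====
-- from typing import Sequence
--
-- def _split_dirty_candidates(
--     paths: Sequence[str],
--     dirty_candidates: set[str],
-- ) -> tuple[list[str], list[str]]:
--     """Partition dirty candidates into requested-scope and out-of-scope paths."""
--     in_scope: list[str] = []
--     out_of_scope: list[str] = []
--     for candidate in sorted(dirty_candidates):
--         in_requested_scope = any(
--             candidate == scope_path or candidate.startswith(f"{scope_path.rstrip('/')}/")
--             for scope_path in paths
--         )
--         if in_requested_scope: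
--             in_scope.append(candidate)
--         else:
--             out_of_scope.append(candidate)
--     return in_scope, out_of_scope
-- ===== SOURCE B (Python) =====
-- def _split_dirty_candidates(paths, dirty_candidates):
--     """Partition dirty candidates into requested-scope and out-of-scope paths."""
--     exact = set(paths)
--     prefixes = {p.rstrip('/') for p in paths}
--
--     def in_scope(candidate):
--         return candidate in exact or any(
--             candidate[i] == '/' and candidate[:i] in prefixes
--             for i in range(len(candidate))
--         )
--
--     ordered = sorted(dirty_candidates)
--     return [c for c in ordered if in_scope(c)], [c for c in ordered if not in_scope(c)]
-- ===== Notes on version B (the rewrite author's own statement) =====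
-- stated objective: faster
-- what changed: Instead of scanning every scope path per candidate with a string startswith, B precomputes a set of exact paths and a set of rstripped scope prefixes once, then decides each candidate by hashed lookups of its slash-delimited ancestor prefixes.
import Mathlib
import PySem

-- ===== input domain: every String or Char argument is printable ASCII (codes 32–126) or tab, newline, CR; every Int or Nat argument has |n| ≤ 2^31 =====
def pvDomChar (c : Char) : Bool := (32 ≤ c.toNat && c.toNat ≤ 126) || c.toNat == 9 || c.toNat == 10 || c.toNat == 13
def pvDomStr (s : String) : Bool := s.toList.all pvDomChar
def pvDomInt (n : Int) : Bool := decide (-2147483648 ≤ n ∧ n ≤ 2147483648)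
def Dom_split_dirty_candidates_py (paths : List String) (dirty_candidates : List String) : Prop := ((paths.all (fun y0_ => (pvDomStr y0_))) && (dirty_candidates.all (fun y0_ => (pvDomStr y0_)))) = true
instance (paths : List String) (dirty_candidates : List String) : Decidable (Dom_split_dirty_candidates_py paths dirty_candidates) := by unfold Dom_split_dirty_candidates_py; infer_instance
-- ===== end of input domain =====

-- B replaces A's per-candidate scan over all scope paths by two precomputed sets
-- (exact paths and rstripped prefixes) queried per slash-ancestor of the candidate: faster.

-- ===== PORT A =====
-- s.rstrip('/') ported by hand on the char list (drops exactly the trailing '/' characters); exact.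
def rstripSlash (cs : List Char) : List Char := (cs.reverse.dropWhile (· == '/')).reverse

-- any(candidate == scope_path or candidate.startswith(scope_path.rstrip('/') + "/") for scope_path in paths)
-- (PySem.Str.startswith is PySem.Chars.startswith on .toList; ported at the char-list level)
def inRequestedScope (paths : List String) (candidate : String) : Bool :=
  paths.any (fun scope_path =>
    candidate == scope_path ||
    PySem.Chars.startswith candidate.toList (rstripSlash scope_path.toList ++ ['/']))

def split_dirty_candidates_py (paths : List String) (dirty_candidates : List String) : List String × List String :=
  (PySem.List.sorted dirty_candidates (fun x => x) false).foldl
    (fun acc candidate =>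
      if inRequestedScope paths candidate then (acc.1 ++ [candidate], acc.2)
      else (acc.1, acc.2 ++ [candidate]))
    ([], [])

-- ===== PORT B =====
-- candidate in exact or any(candidate[i] == '/' and candidate[:i] in prefixes for i in range(len(candidate)))
def altInScope (exact : PySem.Set String) (prefixes : PySem.Set (List Char)) (c : String) : Bool :=
  PySem.Set.contains exact c ||
  (List.range c.toList.length).any (fun i =>
    c.toList.getD i ' ' == '/' && PySem.Set.contains prefixes (c.toList.take i))

def split_dirty_candidates_py_alt (paths : List String) (dirty_candidates : List String) : List String × List String :=
  let exact := PySem.Set.ofList paths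
  let prefixes := PySem.Set.ofList (paths.map (fun p => rstripSlash p.toList))
  let ordered := PySem.List.sorted dirty_candidates (fun x => x) false
  (ordered.filter (fun c => altInScope exact prefixes c),
   ordered.filter (fun c => !altInScope exact prefixes c))

-- ===== PRECONDITION & SPEC =====
def Spec_split_dirty_candidates_py (paths : List String) (dirty_candidates : List String) (out : List String × List String) : Prop := out = split_dirty_candidates_py_alt paths dirty_candidates
instance (paths : List String) (dirty_candidates : List String) (out : List String × List String) : Decidable (Spec_split_dirty_candidates_py paths dirty_candidates out) := by unfold Spec_split_dirty_candidates_py; infer_instance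

-- ===== CLAIM (what is proved, stated in full; the proofs are below) =====
def Claim_equal_split_dirty_candidates_py : Prop := ∀ (paths : List String) (dirty_candidates : List String), Dom_split_dirty_candidates_py paths dirty_candidates → Spec_split_dirty_candidates_py paths dirty_candidates (split_dirty_candidates_py paths dirty_candidates)

-- ===== LEMMAS AND PROOFS =====

-- s ++ ['/'] is a prefix of cs iff cs has a '/' at some position i whose prefix is s
lemma append_slash_prefix_iff (s cs : List Char) :
    (s ++ ['/']) <+: cs ↔ ∃ i, i < cs.length ∧ cs.getD i ' ' = '/' ∧ cs.take i = s := by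
  constructor
  · rintro ⟨t, ht⟩
    subst ht
    refine ⟨s.length, by simp, ?_, ?_⟩
    · simp [List.getD, List.getElem?_append_right]
    · simpa using List.take_left (l₂ := '/' :: t) (l₁ := s)
  · rintro ⟨i, hi, hc, hs⟩
    have htake : cs.take (i + 1) = s ++ ['/'] := by
      rw [List.take_succ]
      simp only [List.getElem?_eq_getElem hi]
      have : cs[i] = '/' := by simpa [List.getD, List.getElem?_eq_getElem hi] using hc
      simp [hs, this]
    exact htake ▸ List.take_prefix _ _

lemma test_eq (paths : List String) (c : String) :
    altInScope (PySem.Set.ofList paths) (PySem.Set.ofList (paths.map (fun p => rstripSlash p.toList))) c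
      = inRequestedScope paths c := by
  rw [Bool.eq_iff_iff]
  simp only [altInScope, inRequestedScope, Bool.or_eq_true, List.any_eq_true,
    PySem.Set.contains_iff, PySem.Set.mem_ofList, Bool.and_eq_true, beq_iff_eq,
    PySem.Chars.startswith_iff, List.mem_range, List.mem_map]
  constructor
  · rintro (hmem | ⟨i, hi, hc, p, hp, hps⟩)
    · exact ⟨c, hmem, Or.inl rfl⟩
    · exact ⟨p, hp, Or.inr ((append_slash_prefix_iff _ _).2 ⟨i, hi, hc, hps.symm⟩)⟩
  · rintro ⟨p, hp, (rfl | hpre)⟩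
    · exact Or.inl hp
    · obtain ⟨i, hi, hc, hs⟩ := (append_slash_prefix_iff _ _).1 hpre
      exact Or.inr ⟨i, hi, hc, p, hp, hs.symm⟩

-- A's append-fold is filter/filter-not, starting from any accumulator
lemma foldl_partition (f : String → Bool) (l : List String) (a b : List String) :
    l.foldl (fun acc c => if f c then (acc.1 ++ [c], acc.2) else (acc.1, acc.2 ++ [c])) (a, b)
      = (a ++ l.filter f, b ++ l.filter (fun c => !f c)) := by
  induction l generalizing a b with
  | nil => simp
  | cons x xs ih =>
    by_cases h : f x = true <;> simp [List.foldl_cons, h, ih]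

-- ===== VERDICT (by name: the statement is the Claim_ definition above) =====
theorem split_dirty_candidates_py_spec : Claim_equal_split_dirty_candidates_py := by
  intro paths dirty _
  unfold Spec_split_dirty_candidates_py split_dirty_candidates_py split_dirty_candidates_py_alt
  rw [foldl_partition]
  simp only [List.nil_append]
  refine Prod.ext ?_ ?_ <;>
    exact (List.filter_congr (fun c _ => by rw [test_eq])).symm
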